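-- pv_equiv track=rewrite | github.com/smallbee3/algorithm-problems | python/testdome/13_test_1.py | nth_most_rare
-- ===== SOURCE A (Python) =====
-- def nth_most_rare(elements, n):
--
--     rare_dict = {}
--     for i in elements:
--         if rare_dict.get(i):
--             rare_dict[i] += 1
--             continue
--         rare_dict[i] = 1
--
--     rank_list = [list(rare_dict.keys())[0]]
--
--     for i in list(rare_dict.keys())[1:]:
--         for idx, j in enumerate(rank_list):
--             if rare_dict[i] < rare_dict[j]:
--                 rank_list.insert(idx, i)
--                 break
--             if idx == len(rank_list) - 1:
--                 rank_list.insert(idx+1, i)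
--                 break
--
--     return rank_list[n-1]
-- ===== SOURCE B (Python) =====
-- def nth_most_rare(elements, n):
--     counts = {}
--     for x in elements:
--         counts[x] = counts.get(x, 0) + 1
--     ranked = sorted(counts, key=lambda k: counts[k])
--     return ranked[n - 1]
-- ===== Notes on version B (the rewrite author's own statement) =====
-- stated objective: idiomatic
-- what changed: B replaces A's truthiness-guarded counting dict and hand-rolled quadratic insertion sort (enumerate + list.insert) with a plain counting loop followed by Python's stable built-in sorted(keys, key=count), keeping first-appearance order on ties and the same ranked[n-1] indexing.
import Mathlib
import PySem

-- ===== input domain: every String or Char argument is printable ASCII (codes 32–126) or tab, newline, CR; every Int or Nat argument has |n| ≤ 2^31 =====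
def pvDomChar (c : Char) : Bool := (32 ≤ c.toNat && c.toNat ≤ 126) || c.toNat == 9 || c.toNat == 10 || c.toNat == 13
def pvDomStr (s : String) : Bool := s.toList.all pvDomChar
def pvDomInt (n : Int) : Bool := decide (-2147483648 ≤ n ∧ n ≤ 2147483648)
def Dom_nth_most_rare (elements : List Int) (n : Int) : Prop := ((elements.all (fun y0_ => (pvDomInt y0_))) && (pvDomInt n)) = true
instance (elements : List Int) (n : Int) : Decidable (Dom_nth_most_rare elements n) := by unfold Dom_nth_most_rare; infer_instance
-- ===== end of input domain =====

-- B replaces A's hand-rolled quadratic insertion sort by counting plus the stable library sort by count (idiomatic).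

-- ===== PORT A =====
-- inner 'for idx, j in enumerate(rank_list): …' loop of A: scan from position idx,
-- insert i before the first j with count i < count j, else append at the end
def pvAIns (d : PySem.Dict Int Int) (i : Int) (rank : List Int) (idx : Nat) : List Int :=
  if h : idx < rank.length then
    if d.getD i 0 < d.getD rank[idx] 0 then rank.take idx ++ i :: rank.drop idx  -- rank_list.insert(idx, i)
    else if idx = rank.length - 1 then rank ++ [i]                               -- rank_list.insert(idx+1, i)
    else pvAIns d i rank (idx + 1)
  else rank   -- loop exhausted without break (unreachable for nonempty rank)
termination_by rank.length - idx

def nth_most_rare (elements : List Int) (n : Int) : Int :=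
  -- for i in elements: if rare_dict.get(i): rare_dict[i] += 1 else rare_dict[i] = 1
  let rare := elements.foldl (fun d i =>
      if d.getD i 0 ≠ 0 then d.insert i (d.getD i 0 + 1) else d.insert i 1)
    PySem.Dict.empty
  let ks := rare.keys
  -- rank_list = [list(rare_dict.keys())[0]]  (Pre_ excludes empty elements, where Python raises IndexError)
  -- for i in list(rare_dict.keys())[1:]: …
  let rank := (ks.drop 1).foldl (fun r i => pvAIns rare i r 0) [ks.headD 0]
  (PySem.List.pyGet? rank (n - 1)).getD 0   -- rank_list[n-1]; none = IndexError, excluded by Pre_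

-- ===== PORT B =====
def nth_most_rare_alt (elements : List Int) (n : Int) : Int :=
  -- counts[x] = counts.get(x, 0) + 1
  let counts := elements.foldl (fun d x => d.insert x (d.getD x 0 + 1)) (PySem.Dict.empty : PySem.Dict Int Int)
  -- ranked = sorted(counts, key=lambda k: counts[k])
  let ranked := PySem.List.sorted counts.keys (fun k => counts.getD k 0)
  (PySem.List.pyGet? ranked (n - 1)).getD 0  -- ranked[n-1]; none = IndexError, excluded by Pre_

-- ===== PRECONDITION & SPEC =====
-- Pre_ excludes exactly the inputs on which Python A raises IndexError: empty `elements`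
-- (keys()[0] fails) and an index n-1 outside Python range for the list of distinct elements.
def Pre_nth_most_rare (elements : List Int) (n : Int) : Prop :=
  PySem.Raise.InRange (PySem.Set.ofList elements).length (n - 1)
instance (elements : List Int) (n : Int) : Decidable (Pre_nth_most_rare elements n) := by
  unfold Pre_nth_most_rare; infer_instance

def pvWitness_nth_most_rare : List Int × Int := ([3, 1, 3, 2, 1, 3], 1)

def Spec_nth_most_rare (elements : List Int) (n : Int) (out : Int) : Prop := out = nth_most_rare_alt elements n
instance (elements : List Int) (n : Int) (out : Int) : Decidable (Spec_nth_most_rare elements n out) := by unfold Spec_nth_most_rare; infer_instance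

-- ===== CLAIM (what is proved, stated in full; the proofs are below) =====
def Claim_equal_nth_most_rare : Prop := ∀ (elements : List Int) (n : Int), Dom_nth_most_rare elements n → Pre_nth_most_rare elements n → Spec_nth_most_rare elements n (nth_most_rare elements n)

-- ===== LEMMAS AND PROOFS =====

-- A's truthiness-guarded counting loop builds the same dict as B's plain counting loop (= Counter)
lemma pvCountA_eq_counter (elements : List Int) :
    elements.foldl (fun d i =>
        if d.getD i 0 ≠ 0 then d.insert i (d.getD i 0 + 1) else d.insert i 1)
      PySem.Dict.empty = PySem.Dict.counter elements := by
  rw [← PySem.Dict.foldl_insert_getD_add_one_eq_counter]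
  congr 1
  funext d i
  by_cases h : d.getD i 0 = 0 <;> simp [h]

-- A's inner scan-and-insert from position idx is insertBy on the tail
lemma pvAIns_eq (d : PySem.Dict Int Int) (i : Int) (rank : List Int) (idx : Nat)
    (h : idx < rank.length) :
    pvAIns d i rank idx =
      rank.take idx ++
        PySem.List.insertBy (fun a b => decide (d.getD a 0 < d.getD b 0)) i (rank.drop idx) := by
  rw [pvAIns, dif_pos h]
  have hdrop : rank.drop idx = rank[idx] :: rank.drop (idx + 1) := List.drop_eq_getElem_cons h
  have htake : rank.take (idx + 1) = rank.take idx ++ [rank[idx]] := by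
    rw [List.take_add_one, List.getElem?_eq_getElem h]; rfl
  by_cases h1 : d.getD i 0 < d.getD rank[idx] 0
  · rw [if_pos h1, hdrop]
    simp [PySem.List.insertBy, h1]
  · rw [if_neg h1]
    by_cases h2 : idx = rank.length - 1
    · rw [if_pos h2]
      have hd2 : rank.drop (idx + 1) = [] := List.drop_eq_nil_of_le (by omega)
      have hrank : rank = rank.take idx ++ [rank[idx]] := by
        conv_lhs => rw [← List.take_append_drop (idx + 1) rank]
        rw [hd2, htake, List.append_nil]
      rw [hdrop, hd2]
      simp only [PySem.List.insertBy, h1, decide_false, Bool.false_eq_true, if_false]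
      conv_lhs => rw [hrank]
      rw [List.append_assoc]
      rfl
    · rw [if_neg h2, pvAIns_eq d i rank (idx + 1) (by omega), hdrop, htake]
      simp only [PySem.List.insertBy, h1, decide_false, Bool.false_eq_true, if_false]
      rw [List.append_assoc]
      rfl
termination_by rank.length - idx

-- A's outer loop over the remaining keys is the insertBy fold, for any nonempty start
lemma pvFold_eq_insertBy (d : PySem.Dict Int Int) (l : List Int) (acc : List Int)
    (hne : acc ≠ []) :
    l.foldl (fun r i => pvAIns d i r 0) acc
      = l.foldl (fun r i =>
          PySem.List.insertBy (fun a b => decide (d.getD a 0 < d.getD b 0)) i r) acc := by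
  induction l generalizing acc with
  | nil => rfl
  | cons x xs ih =>
    simp only [List.foldl_cons]
    have h0 : 0 < acc.length := by cases acc with
      | nil => exact absurd rfl hne
      | cons a as => simp
    rw [pvAIns_eq d x acc 0 h0]
    simp only [List.take_zero, List.drop_zero, List.nil_append]
    exact ih _ (List.ne_nil_of_mem
      ((PySem.List.mem_insertBy _ x x _).mpr (Or.inl rfl)))

-- ===== VERDICT (by name: the statement is the Claim_ definition above) =====
theorem nth_most_rare_spec : Claim_equal_nth_most_rare := by
  intro elements n _ hpre
  unfold Spec_nth_most_rare nth_most_rare nth_most_rare_alt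
  simp only [pvCountA_eq_counter, PySem.Dict.foldl_insert_getD_add_one_eq_counter]
  have hne : elements ≠ [] := by
    intro h
    subst h
    simp [Pre_nth_most_rare, PySem.Raise.InRange] at hpre
    omega
  have hks : (PySem.Dict.counter elements).keys ≠ [] := by
    cases elements with
    | nil => exact absurd rfl hne
    | cons e es =>
      rw [PySem.Dict.keys_counter]
      have he : e ∈ PySem.Set.ofList (e :: es) := by
        rw [PySem.Set.mem_ofList]
        exact List.mem_cons_self
      exact List.ne_nil_of_mem he
  obtain ⟨k, rest, hkr⟩ := List.exists_cons_of_ne_nil hks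
  rw [hkr]
  congr 1
  rw [PySem.List.sorted_eq_foldl_insertBy]
  rw [List.foldl_cons]
  simp only [List.drop_succ_cons, List.drop_zero, List.headD_cons]
  rw [pvFold_eq_insertBy _ _ _ (List.cons_ne_nil _ _)]
  rfl
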